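-- pv_equiv track=rewrite | github.com/HITOfficial/College | ASD/Dynamic Greedy/best_representation.py | best_representation
-- ===== SOURCE A (Python) =====
-- def best_representation(S, t):
--     t_len = len(t)
--     answer = [-1]*t_len
--     for i in range(t_len+1):
--         for s in S:
--             if i+1 >= len(s):
--                 word = t[i-len(s)+1:i+1]
--                 if word == s:
--                     # longest part is an answer
--                     answer[i] = max(max(len(s), answer[i -
--                                                        len(s)]), answer[i])
--     return answer[-1]
-- ===== SOURCE B (Python) =====
-- def best_representation(S, t):
--     # Two-pass: find all occurrences of each word with str.find (C-speed scan),
--     # bucket match lengths by end position, then one DP sweep over positions.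
--     n = len(t)
--     ends = [[] for _ in range(n)]
--     for s in S:
--         m = len(s)
--         j = t.find(s)
--         while j != -1:
--             ends[j + m - 1].append(m)
--             j = t.find(s, j + 1)
--     dp = []
--     for i in range(n):
--         best = -1
--         for m in ends[i]:
--             prev = dp[i - m] if i >= m else -1
--             c = m if m > prev else prev
--             if c > best:
--                 best = c
--         dp.append(best)
--     return dp[-1]
-- ===== Notes on version B (the rewrite author's own statement) =====
-- stated objective: faster
-- what changed: A checks every pattern against every end position by slicing t; B first collects all occurrences of each pattern with C-level str.find and buckets match lengths by end position, then runs one DP sweep over positions using those buckets.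
-- outside the precondition, e.g. on best_representation([''], 'ab'): A raises IndexError, B raises IndexError; on best_representation(['a'], ''): A raises IndexError, B raises IndexError
import Mathlib
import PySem

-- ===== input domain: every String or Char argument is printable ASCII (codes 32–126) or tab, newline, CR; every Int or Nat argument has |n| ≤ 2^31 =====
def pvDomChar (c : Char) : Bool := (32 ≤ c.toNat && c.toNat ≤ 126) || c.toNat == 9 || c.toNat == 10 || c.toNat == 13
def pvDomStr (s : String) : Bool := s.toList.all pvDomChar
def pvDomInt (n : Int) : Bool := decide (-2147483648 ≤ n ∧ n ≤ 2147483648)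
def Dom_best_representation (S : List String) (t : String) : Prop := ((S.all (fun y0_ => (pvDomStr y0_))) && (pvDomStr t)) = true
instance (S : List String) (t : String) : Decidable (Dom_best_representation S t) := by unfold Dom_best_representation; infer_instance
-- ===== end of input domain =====

-- B replaces A's per-position per-pattern slicing with a two-pass scheme (str.find
-- occurrence buckets, then one DP sweep); measurably faster by a constant factor.

-- ===== PORT A =====
-- inner-loop body of A, named so the proofs can speak about it (literal transliteration)
def pvStepA (tl : List Char) (i : Int) (o : Option (List Int)) (s : String) : Option (List Int) :=
  o.bind fun ans =>
    if PySem.Str.len s ≤ i + 1 then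
      if PySem.List.slice tl (some (i - PySem.Str.len s + 1)) (some (i + 1)) = s.toList then
        (PySem.List.pyGet? ans (i - PySem.Str.len s)).bind fun r =>
          (PySem.List.pyGet? ans i).bind fun cur =>
            PySem.List.pySet? ans i (max (max (PySem.Str.len s) r) cur)
      else some ans
    else some ans

def best_representation (S : List String) (t : String) : Int :=
  let tl := t.toList
  let res : Option (List Int) :=
    (PySem.List.pyRange 0 ((tl.length : Int) + 1)).foldl
      (fun o i => S.foldl (fun o s => pvStepA tl i o s) o)
      (some (List.replicate tl.length (-1 : Int)))
  (res.bind fun ans => PySem.List.pyGet? ans (-1)).getD 0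

-- ===== PORT B =====
-- ends[i].append(m)
def pvBump (ends : List (List Nat)) (i m : Nat) : List (List Nat) :=
  ends.set i (ends.getD i [] ++ [m])

-- the 'j = t.find(s); while j != -1: ends[j+m-1].append(m); j = t.find(s, j+1)' loop.
-- fuel (= len(t)+1 at the call site) and the 'start ≤ tl.length' conjunct are pure
-- totality guards: when start > len(t), find returns -1 and the loop stops anyway,
-- and the fuel is provably sufficient (see pvAddOccs_getD below).
def pvAddOccs (tl s : List Char) (ends : List (List Nat)) : Nat → Nat → List (List Nat)
  | 0, _ => ends
  | fuel + 1, start =>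
    let j := PySem.Chars.findFrom tl s (start : Int)
    if 0 ≤ j ∧ start ≤ tl.length then
      pvAddOccs tl s (pvBump ends (j.toNat + s.length - 1) s.length) fuel (j.toNat + 1)
    else ends

-- inner 'for m in ends[i]' body of B's DP sweep
def pvStepB (dp : List Int) (i : Nat) (best : Int) (m : Nat) : Int :=
  let prev : Int := if m ≤ i then dp.getD (i - m) 0 else -1
  let c : Int := if prev < (m : Int) then (m : Int) else prev
  if best < c then c else best

def best_representation_alt (S : List String) (t : String) : Int :=
  let tl := t.toList
  let n := tl.length
  let ends := S.foldl (fun e s => pvAddOccs tl s.toList e (tl.length + 1) 0) (List.replicate n ([] : List Nat))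
  -- range(n) enumerates 0, …, n-1
  let dp := (List.range n).foldl
    (fun dp i => dp ++ [(ends.getD i []).foldl (pvStepB dp i) (-1)])
    ([] : List Int)
  (PySem.List.pyGet? dp (-1)).getD 0

-- ===== PRECONDITION & SPEC =====
-- Pre_ excludes exactly the inputs on which A raises IndexError: empty t
-- (answer[-1] on the empty list) and an empty pattern in S (write to answer[t_len]).
def Pre_best_representation (S : List String) (t : String) : Prop :=
  t.toList ≠ [] ∧ ∀ s ∈ S, s.toList ≠ []
instance (S : List String) (t : String) : Decidable (Pre_best_representation S t) := by
  unfold Pre_best_representation; infer_instance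

def pvWitness_best_representation : List String × String := (["ab", "b"], "ab")

def Spec_best_representation (S : List String) (t : String) (out : Int) : Prop := out = best_representation_alt S t
instance (S : List String) (t : String) (out : Int) : Decidable (Spec_best_representation S t out) := by unfold Spec_best_representation; infer_instance

-- ===== CLAIM (what is proved, stated in full; the proofs are below) =====
def Claim_equal_best_representation : Prop := ∀ (S : List String) (t : String), Dom_best_representation S t → Pre_best_representation S t → Spec_best_representation S t (best_representation S t)

-- ===== LEMMAS AND PROOFS =====

-- s matches as a suffix of t ending at (0-based) position i (abbrev: decidability is inferred by unfolding)
abbrev pvMatch (tl s : List Char) (i : Nat) : Prop :=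
  s.length ≤ i + 1 ∧ List.take s.length (List.drop (i + 1 - s.length) tl) = s

-- reference DP cell: the max-fold A's inner loop performs at position i
def pvCell (tl : List Char) (pats : List (List Char)) (prev : List Int) (i : Nat) : Int :=
  pats.foldl (fun acc s =>
    if pvMatch tl s i then
      max acc (max (s.length : Int) (if s.length ≤ i then prev.getD (i - s.length) (-1) else -1))
    else acc) (-1)

-- reference DP table of the first k cells
def pvDP (tl : List Char) (pats : List (List Char)) : Nat → List Int
  | 0 => []
  | k + 1 => pvDP tl pats k ++ [pvCell tl pats (pvDP tl pats k) k]

theorem length_pvDP (tl : List Char) (pats : List (List Char)) (k : Nat) :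
    (pvDP tl pats k).length = k := by
  induction k with
  | zero => rfl
  | succ k ih => simp [pvDP, ih]

theorem pvStepA_eq (tl : List Char) (s : String) (hs : s.toList ≠ []) (k : Nat)
    (P rest : List Int) (hlen : P.length = k)
    (hrest : rest = List.replicate (tl.length - k - 1) (-1)) (acc : Int) :
    pvStepA tl (k : Int) (some (P ++ acc :: rest)) s =
      some (P ++ (if pvMatch tl s.toList k then
        max acc (max (s.toList.length : Int)
          (if s.toList.length ≤ k then P.getD (k - s.toList.length) (-1) else -1))
        else acc) :: rest) := by
  have hm1 : 1 ≤ s.toList.length := List.length_pos_iff.mpr hs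
  simp only [pvStepA, Option.bind_some, PySem.Str.len_eq]
  by_cases hc : s.toList.length ≤ k + 1
  · rw [if_pos (by exact_mod_cast hc)]
    have hsl : PySem.List.slice tl (some ((k : Int) - s.toList.length + 1))
        (some ((k : Int) + 1)) = List.take s.toList.length (List.drop (k + 1 - s.toList.length) tl) := by
      rw [PySem.List.slice_toNat tl (by omega) (by omega),
        show ((k : Int) + 1).toNat = k + 1 by omega,
        show ((k : Int) - s.toList.length + 1).toNat = k + 1 - s.toList.length by omega,
        show (k + 1) - (k + 1 - s.toList.length) = s.toList.length by omega]
    rw [hsl]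
    by_cases hw : List.take s.toList.length (List.drop (k + 1 - s.toList.length) tl) = s.toList
    · have hmt : pvMatch tl s.toList k := ⟨hc, hw⟩
      rw [if_pos hw, if_pos hmt]
      have hcur : PySem.List.pyGet? (P ++ acc :: rest) ((k : Nat) : Int) = some acc := by
        rw [show ((k : Nat) : Int) = (P.length : Int) by rw [hlen]]
        exact PySem.List.pyGet?_append_length _ _ _
      have hset : ∀ v : Int, PySem.List.pySet? (P ++ acc :: rest) ((k : Nat) : Int) v
          = some (P ++ v :: rest) := by
        intro v
        rw [PySem.List.pySet?_natCast _ k v (by simp only [List.length_append, List.length_cons]; omega)]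
        rw [show k = P.length from hlen.symm, List.set_append_right _ _ (le_refl _)]
        simp
      by_cases hmk : s.toList.length ≤ k
      · have h2 : k - s.toList.length < P.length := by omega
        have hr : PySem.List.pyGet? (P ++ acc :: rest) ((k : Int) - s.toList.length)
            = some (P.getD (k - s.toList.length) (-1)) := by
          rw [show ((k : Int) - s.toList.length) = ((k - s.toList.length : Nat) : Int) by omega,
              PySem.List.pyGet?_natCast, List.getElem?_append_left h2,
              List.getElem?_eq_getElem h2, List.getD_eq_getElem P (-1) h2]
        rw [hr]
        simp only [Option.bind_some]
        rw [hcur]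
        simp only [Option.bind_some]
        rw [hset, if_pos hmk, max_comm]
      · have h1 : ((k : Int) - s.toList.length) = -1 := by omega
        rw [h1, PySem.List.pyGet?_neg_one]
        by_cases hre : tl.length - k - 1 = 0
        · have hrnil : rest = [] := by rw [hrest, hre]; rfl
          subst hrnil
          rw [show (P ++ acc :: ([] : List Int)).getLast? = some acc from by simp]
          simp only [Option.bind_some]
          rw [hcur]
          simp only [Option.bind_some]
          rw [hset, if_neg hmk,
            max_assoc, max_self, show max ((s.toList.length : Nat) : Int) (-1)
              = ((s.toList.length : Nat) : Int) from max_eq_left (by omega), max_comm]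
        · have hgl : (P ++ acc :: rest).getLast? = some (-1) := by
            rw [show acc :: rest = [acc] ++ rest from rfl, ← List.append_assoc,
              List.getLast?_append_of_ne_nil _ (by rw [hrest]; simp [hre]), hrest,
              List.getLast?_replicate]
            simp [hre]
          rw [hgl]
          simp only [Option.bind_some]
          rw [hcur]
          simp only [Option.bind_some]
          rw [hset, if_neg hmk, max_comm]
    · have hmt : ¬ pvMatch tl s.toList k := fun hmm => hw hmm.2
      rw [if_neg hw, if_neg hmt]
  · have hmt : ¬ pvMatch tl s.toList k := fun hmm => hc hmm.1
    rw [if_neg (by exact_mod_cast hc), if_neg hmt]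

theorem pvA_inner (tl : List Char) (S' : List String) (hS : ∀ s ∈ S', s.toList ≠ [])
    (k : Nat) (P rest : List Int) (hlen : P.length = k)
    (hrest : rest = List.replicate (tl.length - k - 1) (-1)) (acc : Int) :
    S'.foldl (fun o s => pvStepA tl (k : Int) o s) (some (P ++ acc :: rest)) =
      some (P ++ (S'.foldl (fun a s =>
        if pvMatch tl s.toList k then
          max a (max (s.toList.length : Int)
            (if s.toList.length ≤ k then P.getD (k - s.toList.length) (-1) else -1))
        else a) acc) :: rest) := by
  induction S' generalizing acc with
  | nil => rfl
  | cons s ss ih =>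
    simp only [List.foldl_cons]
    rw [pvStepA_eq tl s (hS s (by simp)) k P rest hlen hrest acc]
    exact ih (fun x hx => hS x (List.mem_cons_of_mem _ hx)) _

theorem pvA_last (tl : List Char) (S' : List String) (hS : ∀ s ∈ S', s.toList ≠ [])
    (full : List Int) :
    S'.foldl (fun o s => pvStepA tl (tl.length : Int) o s) (some full) = some full := by
  induction S' with
  | nil => rfl
  | cons s ss ih =>
    have hs : s.toList ≠ [] := hS s (by simp)
    have hm1 : 1 ≤ s.toList.length := List.length_pos_iff.mpr hs
    have hstep : pvStepA tl (tl.length : Int) (some full) s = some full := by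
      simp only [pvStepA, Option.bind_some, PySem.Str.len_eq]
      by_cases hc : s.toList.length ≤ tl.length + 1
      · rw [if_pos (by exact_mod_cast hc),
          PySem.List.slice_toNat tl (by omega) (by omega),
          show ((tl.length : Int) + 1).toNat = tl.length + 1 by omega,
          show ((tl.length : Int) - s.toList.length + 1).toNat
            = tl.length + 1 - s.toList.length by omega]
        have hne : List.take (tl.length + 1 - (tl.length + 1 - s.toList.length))
            (List.drop (tl.length + 1 - s.toList.length) tl) ≠ s.toList := by
          intro he
          have := congrArg List.length he
          simp only [List.length_take, List.length_drop] at this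
          omega
        rw [if_neg hne]
      · rw [if_neg (by exact_mod_cast hc)]
    simp only [List.foldl_cons, hstep]
    exact ih (fun x hx => hS x (List.mem_cons_of_mem _ hx))

theorem pvA_loop (tl : List Char) (S : List String) (hS : ∀ s ∈ S, s.toList ≠ [])
    (k : Nat) (hk : k ≤ tl.length) :
    (PySem.List.pyRange 0 (k : Int)).foldl
        (fun o i => S.foldl (fun o s => pvStepA tl i o s) o)
        (some (List.replicate tl.length (-1 : Int))) =
      some (pvDP tl (S.map String.toList) k ++ List.replicate (tl.length - k) (-1)) := by
  induction k with
  | zero =>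
    simp only [Nat.cast_zero, pvDP, List.nil_append, Nat.sub_zero]
    rfl
  | succ k ih =>
    have hk' : k ≤ tl.length := by omega
    rw [show ((k + 1 : Nat) : Int) = (k : Int) + 1 by push_cast; ring,
      PySem.List.pyRange_one_succ_right (by positivity), List.foldl_append, ih hk']
    have hrep : List.replicate (tl.length - k) (-1 : Int)
        = (-1) :: List.replicate (tl.length - k - 1) (-1) := by
      have h1 : tl.length - k = (tl.length - k - 1) + 1 := by omega
      conv_lhs => rw [h1, List.replicate_succ]
    rw [hrep]
    simp only [List.foldl_cons, List.foldl_nil]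
    rw [pvA_inner tl S hS k (pvDP tl (S.map String.toList) k)
      (List.replicate (tl.length - k - 1) (-1)) (length_pvDP tl _ k) rfl (-1)]
    have hcell : (S.foldl (fun a s =>
        if pvMatch tl s.toList k then
          max a (max (s.toList.length : Int)
            (if s.toList.length ≤ k then (pvDP tl (S.map String.toList) k).getD
              (k - s.toList.length) (-1) else -1))
        else a) (-1)) = pvCell tl (S.map String.toList) (pvDP tl (S.map String.toList) k) k := by
      rw [pvCell, List.foldl_map]
    rw [hcell, show pvDP tl (S.map String.toList) (k + 1)
        = pvDP tl (S.map String.toList) k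
          ++ [pvCell tl (S.map String.toList) (pvDP tl (S.map String.toList) k) k] from rfl]
    simp [List.append_assoc]
    omega

theorem pvA_eq (S : List String) (t : String) (hS : ∀ s ∈ S, s.toList ≠ []) :
    best_representation S t =
      (PySem.List.pyGet? (pvDP t.toList (S.map String.toList) t.toList.length) (-1)).getD 0 := by
  simp only [best_representation]
  rw [PySem.List.pyRange_one_succ_right (by positivity), List.foldl_append,
    pvA_loop t.toList S hS t.toList.length (le_refl _)]
  simp only [Nat.sub_self, List.replicate_zero, List.append_nil, List.foldl_cons, List.foldl_nil]
  rw [pvA_last t.toList S hS]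
  rfl

theorem length_pvAddOccs (tl s : List Char) (ends : List (List Nat)) (fuel start : Nat) :
    (pvAddOccs tl s ends fuel start).length = ends.length := by
  induction fuel generalizing ends start with
  | zero => rfl
  | succ fuel ih =>
    simp only [pvAddOccs]
    split
    · rw [ih]; simp [pvBump]
    · rfl

theorem pvAddOccs_getD (tl s : List Char) (hs : s ≠ []) (ends : List (List Nat))
    (hlen : ends.length = tl.length) (fuel start : Nat)
    (hfuel : tl.length + 1 - start ≤ fuel) (i : Nat) :
    (pvAddOccs tl s ends fuel start).getD i [] =
      ends.getD i [] ++
        (if s.length ≤ i + 1 ∧ start ≤ i + 1 - s.length ∧ s <+: List.drop (i + 1 - s.length) tl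
          then [s.length] else []) := by
  have hm1 : 1 ≤ s.length := List.length_pos_iff.mpr hs
  revert hlen hfuel
  induction fuel generalizing ends start with
  | zero =>
    intro hlen hfuel
    have hcF : ¬ (s.length ≤ i + 1 ∧ start ≤ i + 1 - s.length
        ∧ s <+: List.drop (i + 1 - s.length) tl) := by
      rintro ⟨hc1, hc2, hc3⟩
      have hnil : List.drop (i + 1 - s.length) tl = [] :=
        List.drop_eq_nil_of_le (by omega)
      rw [hnil] at hc3
      exact hs (List.prefix_nil.mp hc3)
    simp only [pvAddOccs]
    rw [if_neg hcF, List.append_nil]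
  | succ fuel ih =>
    intro hlen hfuel
    simp only [pvAddOccs]
    set j := PySem.Chars.findFrom tl s (start : Int) with hj
    split
    case isTrue h =>
      obtain ⟨h0, hsl⟩ := h
      have hne : j ≠ -1 := by omega
      have hspec := PySem.Chars.findFrom_natCast_spec tl s start hsl
      rw [← hj] at hspec
      obtain ⟨hj1, hj2, hj3⟩ := hspec hne
      have hjn : start ≤ j.toNat := by omega
      have hjlen : j.toNat + s.length ≤ tl.length := by
        have := hj2.length_le
        simp only [List.length_drop] at this
        omega
      have hblen : (pvBump ends (j.toNat + s.length - 1) s.length).length = tl.length := by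
        simp [pvBump, hlen]
      rw [ih (pvBump ends (j.toNat + s.length - 1) s.length) (j.toNat + 1) hblen (by omega)]
      by_cases hi : i = j.toNat + s.length - 1
      · subst hi
        have hidx : j.toNat + s.length - 1 < ends.length := by omega
        have hb : (pvBump ends (j.toNat + s.length - 1) s.length).getD (j.toNat + s.length - 1) []
            = ends.getD (j.toNat + s.length - 1) [] ++ [s.length] := by
          simp [pvBump, List.getD_eq_getElem?_getD, List.getElem?_set_self hidx]
        rw [hb]
        have hcondT : s.length ≤ (j.toNat + s.length - 1) + 1
            ∧ start ≤ (j.toNat + s.length - 1) + 1 - s.length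
            ∧ s <+: List.drop ((j.toNat + s.length - 1) + 1 - s.length) tl := by
          refine ⟨by omega, by omega, ?_⟩
          rw [show (j.toNat + s.length - 1) + 1 - s.length = j.toNat by omega]
          exact hj2
        have hcondF : ¬ (s.length ≤ (j.toNat + s.length - 1) + 1
            ∧ j.toNat + 1 ≤ (j.toNat + s.length - 1) + 1 - s.length
            ∧ s <+: List.drop ((j.toNat + s.length - 1) + 1 - s.length) tl) := by
          rintro ⟨-, hb2, -⟩
          omega
        rw [if_pos hcondT, if_neg hcondF, List.append_nil]
      · have hb : (pvBump ends (j.toNat + s.length - 1) s.length).getD i []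
            = ends.getD i [] := by
          simp [pvBump, List.getD_eq_getElem?_getD, List.getElem?_set_ne (fun h => hi h.symm)]
        rw [hb]
        have hcond : (s.length ≤ i + 1 ∧ j.toNat + 1 ≤ i + 1 - s.length
              ∧ s <+: List.drop (i + 1 - s.length) tl)
            ↔ (s.length ≤ i + 1 ∧ start ≤ i + 1 - s.length
              ∧ s <+: List.drop (i + 1 - s.length) tl) := by
          constructor
          · rintro ⟨a, b, c⟩; exact ⟨a, by omega, c⟩
          · rintro ⟨a, b, c⟩
            refine ⟨a, ?_, c⟩
            by_contra hlt
            have hne' : i + 1 - s.length ≠ j.toNat := fun he => hi (by omega)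
            exact hj3 _ b (by omega) c
        rw [if_congr hcond rfl rfl]
    case isFalse h =>
      have hcF : ¬ (s.length ≤ i + 1 ∧ start ≤ i + 1 - s.length
          ∧ s <+: List.drop (i + 1 - s.length) tl) := by
        rintro ⟨hc1, hc2, hc3⟩
        by_cases hsl : start ≤ tl.length
        · have h0 : j < 0 := by
            by_contra hh
            exact h ⟨by omega, hsl⟩
          have hk := PySem.Chars.findFrom_natCast tl s start hsl
          rw [← hj] at hk
          have hge := PySem.Chars.neg_one_le_find (List.drop start tl) s
          have hneg : j = -1 := by
            by_cases hf : PySem.Chars.find (List.drop start tl) s = -1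
            · rw [if_pos hf] at hk; exact hk
            · rw [if_neg hf] at hk; omega
          have hiff := PySem.Chars.findFrom_natCast_eq_neg_one_iff tl s start hsl
          rw [← hj] at hiff
          have hni : ¬ s <:+: List.drop start tl := hiff.mp hneg
          apply hni
          have hdd : List.drop (i + 1 - s.length) tl
              = List.drop ((i + 1 - s.length) - start) (List.drop start tl) := by
            rw [List.drop_drop]
            congr 1
            omega
          rw [hdd] at hc3
          exact hc3.isInfix.trans (List.drop_suffix _ _).isInfix
        · have hnil : List.drop (i + 1 - s.length) tl = [] :=
            List.drop_eq_nil_of_le (by omega)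
          rw [hnil] at hc3
          exact hs (List.prefix_nil.mp hc3)
      rw [if_neg hcF, List.append_nil]

theorem pvEnds_getD (tl : List Char) (S : List String) (hS : ∀ s ∈ S, s.toList ≠ [])
    (init : List (List Nat)) (hlen : init.length = tl.length) (i : Nat) :
    (S.foldl (fun e s => pvAddOccs tl s.toList e (tl.length + 1) 0) init).getD i [] =
      init.getD i [] ++
        (S.filter (fun s => decide (pvMatch tl s.toList i))).map (fun s => s.toList.length) := by
  induction S generalizing init with
  | nil => simp
  | cons s ss ih =>
    have hs : s.toList ≠ [] := hS s (by simp)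
    simp only [List.foldl_cons]
    rw [ih (fun x hx => hS x (List.mem_cons_of_mem _ hx)) _
      (by rw [length_pvAddOccs]; exact hlen)]
    rw [pvAddOccs_getD tl s.toList hs init hlen (tl.length + 1) 0 (by omega) i]
    have hiff : (s.toList.length ≤ i + 1 ∧ 0 ≤ i + 1 - s.toList.length
        ∧ s.toList <+: List.drop (i + 1 - s.toList.length) tl) ↔ pvMatch tl s.toList i := by
      unfold pvMatch
      constructor
      · rintro ⟨a, -, c⟩
        exact ⟨a, (List.prefix_iff_eq_take.mp c).symm⟩
      · rintro ⟨a, b⟩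
        exact ⟨a, Nat.zero_le _, List.prefix_iff_eq_take.mpr b.symm⟩
    by_cases hp : pvMatch tl s.toList i
    · rw [if_pos (hiff.mpr hp), List.filter_cons_of_pos (by simpa using hp), List.map_cons]
      simp [List.append_assoc]
    · rw [if_neg (fun hc => hp (hiff.mp hc)), List.filter_cons_of_neg (by simpa using hp),
        List.append_nil]

theorem pvB_cell (tl : List Char) (S : List String) (hS : ∀ s ∈ S, s.toList ≠ [])
    (ends : List (List Nat)) (i : Nat)
    (hends : ends.getD i [] =
      (S.filter (fun s => decide (pvMatch tl s.toList i))).map (fun s => s.toList.length)) :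
    (ends.getD i []).foldl (pvStepB (pvDP tl (S.map String.toList) i) i) (-1) =
      pvCell tl (S.map String.toList) (pvDP tl (S.map String.toList) i) i := by
  rw [hends, List.foldl_map,
    ← PySem.List.foldl_if_eq_foldl_filter (p := fun s => decide (pvMatch tl s.toList i))
      (f := fun a (s : String) => pvStepB (pvDP tl (S.map String.toList) i) i a s.toList.length)]
  unfold pvCell
  rw [List.foldl_map]
  apply PySem.List.foldl_congr_mem
  intro acc x hx
  have hm1 : 1 ≤ x.toList.length := List.length_pos_iff.mpr (hS x hx)
  by_cases hp : pvMatch tl x.toList i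
  · rw [if_pos (by simpa using hp), if_pos hp]
    simp only [pvStepB]
    by_cases hmi : x.toList.length ≤ i
    · have hlt : i - x.toList.length < (pvDP tl (S.map String.toList) i).length := by
        rw [length_pvDP]; omega
      rw [if_pos hmi, if_pos hmi, List.getD_eq_getElem _ 0 hlt, List.getD_eq_getElem _ (-1) hlt]
      simp only [max_def]
      split_ifs <;> omega
    · rw [if_neg hmi, if_neg hmi]
      simp only [max_def]
      split_ifs <;> omega
  · rw [if_neg (by simpa using hp), if_neg hp]

theorem pvB_dp (tl : List Char) (S : List String) (hS : ∀ s ∈ S, s.toList ≠ [])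
    (ends : List (List Nat))
    (hends : ∀ i, ends.getD i [] =
      (S.filter (fun s => decide (pvMatch tl s.toList i))).map (fun s => s.toList.length))
    (k : Nat) :
    (List.range k).foldl (fun dp i => dp ++ [(ends.getD i []).foldl (pvStepB dp i) (-1)]) []
      = pvDP tl (S.map String.toList) k := by
  induction k with
  | zero => rfl
  | succ k ih =>
    rw [List.range_succ, List.foldl_append, ih]
    simp only [List.foldl_cons, List.foldl_nil]
    rw [pvB_cell tl S hS ends k (hends k)]
    rfl

theorem pvB_eq (S : List String) (t : String) (hS : ∀ s ∈ S, s.toList ≠ []) :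
    best_representation_alt S t =
      (PySem.List.pyGet? (pvDP t.toList (S.map String.toList) t.toList.length) (-1)).getD 0 := by
  have hends : ∀ i, (S.foldl (fun e s => pvAddOccs t.toList s.toList e (t.toList.length + 1) 0)
      (List.replicate t.toList.length [])).getD i []
      = (S.filter (fun s => decide (pvMatch t.toList s.toList i))).map
          (fun s => s.toList.length) := by
    intro i
    rw [pvEnds_getD t.toList S hS _ (by simp) i]
    have hrep : (List.replicate t.toList.length ([] : List Nat)).getD i [] = [] := by
      rw [List.getD_eq_getElem?_getD, List.getElem?_replicate]
      split <;> rfl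
    rw [hrep, List.nil_append]
  simp only [best_representation_alt]
  rw [pvB_dp t.toList S hS _ hends t.toList.length]

-- ===== VERDICT (by name: the statement is the Claim_ definition above) =====
theorem best_representation_spec : Claim_equal_best_representation := by
  intro S t _ hPre
  unfold Spec_best_representation
  rw [pvA_eq S t hPre.2, pvB_eq S t hPre.2]
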